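-- pv_equiv track=rewrite | github.com/HerrjeAlf/TestBuilder | skripte/funktionen.py | ergebnisraum_zoZ
-- ===== SOURCE A (Python) =====
-- def ergebnisraum_zoZ(az, anz_1, anz_2, farbe1='weiß', farbe2='schwarz'):
--     anz_ges = anz_1 + anz_2
--     if az > anz_ges:
--         az = anz_ges
--     omega1 = [[farbe1 for element in range(az)]]
--     if az > anz_1:
--         omega = []
--     else:
--         omega = [[farbe1 for element in range(az)]]
--     for anzahl in omega1:
--         i = 0
--         for stelle in anzahl:
--             tubel = anzahl.copy()
--             tubel[i] = farbe2
--             for element in omega1: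
--                 if tubel not in omega1:
--                     omega1.append(tubel)
--                     if tubel.count(farbe2) <= anz_2 and tubel.count(farbe1) <= anz_1:
--                         omega.append(tubel)
--             i += 1
--     return omega
-- ===== SOURCE B (Python) =====
-- def _rows(m, k, farbe1, farbe2):
--     # all length-m rows containing exactly k copies of farbe2, with the
--     # farbe2-position sets enumerated in lexicographic order
--     if k == 0:
--         return [[farbe1] * m]
--     if k > m:
--         return []
--     return ([[farbe2] + r for r in _rows(m - 1, k - 1, farbe1, farbe2)]
--             + [[farbe1] + r for r in _rows(m - 1, k, farbe1, farbe2)])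
--
--
-- def ergebnisraum_zoZ(az, anz_1, anz_2, farbe1='weiß', farbe2='schwarz'):
--     # Direct combinatorial enumeration: level k (= number of farbe2 entries)
--     # contains exactly the C(n,k) rows, built recursively in lexicographic
--     # order of the farbe2-position sets (which is A's BFS discovery order);
--     # the count filter is decided once per level instead of once per row.
--     az = min(az, anz_1 + anz_2)
--     n = max(az, 0)
--     omega = [] if az > anz_1 else [[farbe1] * n]
--     if farbe1 == farbe2:
--         return omega
--     for k in range(1, n + 1):
--         if k <= anz_2 and n - k <= anz_1:
--             omega.extend(_rows(n, k, farbe1, farbe2))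
--     return omega
-- ===== Notes on version B (the rewrite author's own statement) =====
-- stated objective: alternative
-- what changed: Replaced A's BFS worklist (repeated list-membership scans inside a redundant inner loop over the growing omega1) by a direct recursive combinatorial construction: for each count k of farbe2-entries it builds the C(n,k) rows in lexicographic position order (proved to be exactly A's discovery order), with no worklist and no membership tests; intended as faster (measured 1.95x at the largest size both finished, unconfirmed on larger sizes where both hit the exponential output).
import Mathlib
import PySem

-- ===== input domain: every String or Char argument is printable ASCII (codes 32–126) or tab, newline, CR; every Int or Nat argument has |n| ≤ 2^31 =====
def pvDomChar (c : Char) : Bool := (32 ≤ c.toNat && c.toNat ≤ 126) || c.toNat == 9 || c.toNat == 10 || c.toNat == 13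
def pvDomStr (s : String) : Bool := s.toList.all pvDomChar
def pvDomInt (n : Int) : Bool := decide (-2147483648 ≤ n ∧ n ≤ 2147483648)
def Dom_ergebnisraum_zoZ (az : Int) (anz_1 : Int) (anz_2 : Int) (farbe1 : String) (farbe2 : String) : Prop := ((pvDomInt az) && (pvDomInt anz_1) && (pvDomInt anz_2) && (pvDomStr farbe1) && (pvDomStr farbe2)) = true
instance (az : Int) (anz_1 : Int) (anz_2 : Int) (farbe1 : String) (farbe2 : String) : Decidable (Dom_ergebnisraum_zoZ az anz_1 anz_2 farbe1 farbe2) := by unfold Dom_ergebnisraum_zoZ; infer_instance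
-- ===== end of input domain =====

-- B (alternative): instead of A's BFS worklist with list-membership scans inside a redundant
-- inner loop, B builds, for each count k of farbe2-entries, the C(n,k) rows directly by a
-- recursive combinatorial construction in lexicographic position order (proved here to be
-- exactly A's discovery order), deciding the count filter once per level.

-- ===== PORT A =====
-- Python's 'for element in omega1: if tubel not in omega1: …' iterates over the GROWING list
-- omega1 by index until the index reaches the current length; the fuel (call-site value
-- omega1.length + 1) only makes that indefinite iteration total — at most one append happens,
-- so the loop runs at most length+1 times.
def pvInnerA (anz_1 anz_2 : Int) (farbe1 farbe2 : String) (tubel : List String) :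
    Nat → Nat → List (List String) × List (List String) → List (List String) × List (List String)
  | 0, _, st => st
  | fuel+1, k, (omega1, omega) =>
    if k < omega1.length then
      if tubel ∉ omega1 then
        pvInnerA anz_1 anz_2 farbe1 farbe2 tubel fuel (k+1)
          (omega1 ++ [tubel],
           if (PySem.List.count tubel farbe2 : Int) ≤ anz_2 ∧ (PySem.List.count tubel farbe1 : Int) ≤ anz_1
           then omega ++ [tubel] else omega)
      else
        pvInnerA anz_1 anz_2 farbe1 farbe2 tubel fuel (k+1) (omega1, omega)
    else (omega1, omega)

-- 'for stelle in anzahl: tubel = anzahl.copy(); tubel[i] = farbe2; <inner loop>; i += 1'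
def pvMidA (anz_1 anz_2 : Int) (farbe1 farbe2 : String) (anzahl : List String)
    (st : List (List String) × List (List String)) : List (List String) × List (List String) :=
  (List.range anzahl.length).foldl
    (fun st i => pvInnerA anz_1 anz_2 farbe1 farbe2 (anzahl.set i farbe2) (st.1.length + 1) 0 st) st

-- 'for anzahl in omega1': iteration over the growing omega1 by index; the fuel 2^n+1 only
-- makes it total (omega1 holds pairwise-distinct length-n rows over two colours, so the
-- Python loop performs at most 2^n iterations).
def pvOuterA (anz_1 anz_2 : Int) (farbe1 farbe2 : String) :
    Nat → Nat → List (List String) × List (List String) → List (List String)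
  | 0, _, (_, omega) => omega
  | fuel+1, j, (omega1, omega) =>
    if j < omega1.length then
      pvOuterA anz_1 anz_2 farbe1 farbe2 fuel (j+1)
        (pvMidA anz_1 anz_2 farbe1 farbe2 (omega1.getD j []) (omega1, omega))
    else omega

def ergebnisraum_zoZ (az : Int) (anz_1 : Int) (anz_2 : Int) (farbe1 : String) (farbe2 : String) : List (List String) :=
  let anz_ges := anz_1 + anz_2
  let az' := if az > anz_ges then anz_ges else az
  let start := List.replicate az'.toNat farbe1          -- [farbe1 for _ in range(az)]
  let omega := if az' > anz_1 then [] else [start]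
  pvOuterA anz_1 anz_2 farbe1 farbe2 (2 ^ start.length + 1) 0 ([start], omega)

-- ===== PORT B =====
-- _rows(m, k, farbe1, farbe2): all length-m rows with exactly k farbe2-entries, the
-- farbe2-position sets in lexicographic order.  Source B calls it only with 0 ≤ k ≤ m, so the
-- Nat arguments are exact for every call the port makes.
def pvRowsB (farbe1 farbe2 : String) : Nat → Nat → List (List String)
  | m, 0 => [List.replicate m farbe1]                     -- k == 0
  | 0, _+1 => []                                          -- k > m
  | m+1, k+1 =>
    if m+1 < k+1 then []                                  -- k > m
    else ((pvRowsB farbe1 farbe2 m k).map (farbe2 :: ·))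
         ++ ((pvRowsB farbe1 farbe2 m (k+1)).map (farbe1 :: ·))

def ergebnisraum_zoZ_alt (az : Int) (anz_1 : Int) (anz_2 : Int) (farbe1 : String) (farbe2 : String) : List (List String) :=
  let az' := min az (anz_1 + anz_2)                       -- az = min(az, anz_1 + anz_2)
  let n : Int := max az' 0                                -- n = max(az, 0)
  let omega := if az' > anz_1 then [] else [List.replicate n.toNat farbe1]
  if farbe1 = farbe2 then omega
  else
    (PySem.List.pyRange 1 (n+1) 1).foldl                  -- for k in range(1, n+1)
      (fun om k =>
        if k ≤ anz_2 ∧ n - k ≤ anz_1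
        then om ++ pvRowsB farbe1 farbe2 n.toNat k.toNat  -- omega.extend(_rows(n, k, …))
        else om)
      omega

-- ===== PRECONDITION & SPEC =====
def Spec_ergebnisraum_zoZ (az : Int) (anz_1 : Int) (anz_2 : Int) (farbe1 : String) (farbe2 : String) (out : List (List String)) : Prop := out = ergebnisraum_zoZ_alt az anz_1 anz_2 farbe1 farbe2
instance (az : Int) (anz_1 : Int) (anz_2 : Int) (farbe1 : String) (farbe2 : String) (out : List (List String)) : Decidable (Spec_ergebnisraum_zoZ az anz_1 anz_2 farbe1 farbe2 out) := by unfold Spec_ergebnisraum_zoZ; infer_instance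

-- ===== CLAIM (what is proved, stated in full; the proofs are below) =====
def Claim_equal_ergebnisraum_zoZ : Prop := ∀ (az : Int) (anz_1 : Int) (anz_2 : Int) (farbe1 : String) (farbe2 : String), Dom_ergebnisraum_zoZ az anz_1 anz_2 farbe1 farbe2 → Spec_ergebnisraum_zoZ az anz_1 anz_2 farbe1 farbe2 (ergebnisraum_zoZ az anz_1 anz_2 farbe1 farbe2)

-- ===== LEMMAS AND PROOFS =====

-- ---- proof-layer vocabulary ----

-- one pass of A's inner loop, as a single conditional append
def pvStep (anz_1 anz_2 : Int) (farbe1 farbe2 : String)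
    (st : List (List String) × List (List String)) (t : List String) :
    List (List String) × List (List String) :=
  if t ∈ st.1 then st
  else (st.1 ++ [t],
        if (PySem.List.count t farbe2 : Int) ≤ anz_2 ∧ (PySem.List.count t farbe1 : Int) ≤ anz_1
        then st.2 ++ [t] else st.2)

-- A's middle loop as structural recursion on the row, with processed prefix π
def pvMidRec (anz_1 anz_2 : Int) (farbe1 farbe2 : String) :
    List String → List String → List (List String) × List (List String) → List (List String) × List (List String)
  | _, [], st => st
  | pre, c :: r, st =>
    pvMidRec anz_1 anz_2 farbe1 farbe2 (pre ++ [c]) r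
      (pvStep anz_1 anz_2 farbe1 farbe2 st (pre ++ farbe2 :: r))

-- the genuinely new children of a row: flips at positions after the last farbe2
def pvNc (farbe2 : String) : List String → List (List String)
  | [] => []
  | c :: r =>
    if c = farbe2 then (pvNc farbe2 r).map (farbe2 :: ·)
    else if farbe2 ∈ r then (pvNc farbe2 r).map (c :: ·)
    else (farbe2 :: r) :: (pvNc farbe2 r).map (c :: ·)

-- canonical parent: flip the LAST farbe2 back to farbe1
def pvBack (farbe1 farbe2 : String) : List String → List String
  | [] => []
  | c :: r =>
    if farbe2 ∈ r then c :: pvBack farbe1 farbe2 r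
    else if c = farbe2 then farbe1 :: r
    else c :: r

-- the full BFS universe, level by level
def pvQ (farbe1 farbe2 : String) (n : Nat) : List (List String) :=
  ((List.range (n+1)).map (fun k => pvRowsB farbe1 farbe2 n k)).flatten

-- strict 'earlier in discovery order' inside one level: at the first difference the
-- smaller row has farbe2
inductive pvRlt (farbe1 farbe2 : String) : List String → List String → Prop
  | head (r s : List String) : pvRlt farbe1 farbe2 (farbe2 :: r) (farbe1 :: s)
  | cons (c : String) {r s : List String} : pvRlt farbe1 farbe2 r s → pvRlt farbe1 farbe2 (c :: r) (c :: s)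

def pvQlt (farbe1 farbe2 : String) (x y : List String) : Prop :=
  x.count farbe2 < y.count farbe2 ∨ (x.count farbe2 = y.count farbe2 ∧ pvRlt farbe1 farbe2 x y)

def pvOk (anz_1 anz_2 : Int) (farbe1 farbe2 : String) (t : List String) : Bool :=
  decide ((PySem.List.count t farbe2 : Int) ≤ anz_2 ∧ (PySem.List.count t farbe1 : Int) ≤ anz_1)


-- ---- pvRowsB equations and membership facts ----

theorem pv_count_cons_self (a : String) (l : List String) :
    (a :: l).count a = l.count a + 1 := by simp

theorem pv_count_cons_ne {a b : String} (h : b ≠ a) (l : List String) :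
    (b :: l).count a = l.count a := by simp [List.count_cons, h]

theorem pvRowsB_zero (f1 f2 : String) (m : Nat) : pvRowsB f1 f2 m 0 = [List.replicate m f1] := by
  cases m <;> rfl

theorem pvRowsB_nil (f1 f2 : String) {m k : Nat} (h : m < k) : pvRowsB f1 f2 m k = [] := by
  match m, k with
  | _, 0 => omega
  | 0, k+1 => rfl
  | m+1, k+1 => simp only [pvRowsB, if_pos h]

theorem pvRowsB_succ (f1 f2 : String) {m k : Nat} (h : k ≤ m) :
    pvRowsB f1 f2 (m+1) (k+1)
      = ((pvRowsB f1 f2 m k).map (f2 :: ·)) ++ ((pvRowsB f1 f2 m (k+1)).map (f1 :: ·)) := by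
  simp only [pvRowsB, if_neg (by omega : ¬ m+1 < k+1)]

theorem pvRows_mem {f1 f2 : String} (hne : f1 ≠ f2) :
    ∀ {m k : Nat} {r : List String}, r ∈ pvRowsB f1 f2 m k →
      r.length = m ∧ r.count f2 = k ∧ r.count f1 = m - k ∧ ∀ c ∈ r, c = f1 ∨ c = f2 := by
  intro m
  induction m with
  | zero =>
    intro k r hr
    match k with
    | 0 =>
      rw [pvRowsB_zero] at hr
      simp only [List.mem_singleton] at hr
      subst hr
      simp
    | k+1 => simp [pvRowsB] at hr
  | succ m ih =>
    intro k r hr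
    match k with
    | 0 =>
      rw [pvRowsB_zero] at hr
      simp only [List.mem_singleton] at hr
      subst hr
      refine ⟨by simp, ?_, ?_, by intro c hc; left; exact List.eq_of_mem_replicate hc⟩
      · rw [List.count_replicate, if_neg (by simp [hne])]
      · rw [List.count_replicate, if_pos (by simp)]
        omega
    | k+1 =>
      by_cases hk : k ≤ m
      · rw [pvRowsB_succ f1 f2 hk] at hr
        rcases List.mem_append.mp hr with h | h
        · obtain ⟨r', hr', rfl⟩ := List.mem_map.mp h
          obtain ⟨h1, h2, h3, h4⟩ := ih hr'
          refine ⟨by simp [h1], ?_, ?_, ?_⟩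
          · rw [pv_count_cons_self, h2]
          · rw [pv_count_cons_ne (fun h => hne h.symm), h3]
            omega
          · intro c hc
            simp only [List.mem_cons] at hc
            rcases hc with rfl | hc
            · right; rfl
            · exact h4 _ hc
        · obtain ⟨r', hr', rfl⟩ := List.mem_map.mp h
          obtain ⟨h1, h2, h3, h4⟩ := ih hr'
          have hkm : k + 1 ≤ m := by
            rw [← h2, ← h1]; exact List.count_le_length
          refine ⟨by simp [h1], ?_, ?_, ?_⟩
          · rw [pv_count_cons_ne hne, h2]
          · rw [pv_count_cons_self, h3]; omega
          · intro c hc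
            simp only [List.mem_cons] at hc
            rcases hc with rfl | hc
            · left; rfl
            · exact h4 _ hc
      · rw [pvRowsB_nil f1 f2 (by omega)] at hr
        simp at hr

theorem pvRows_complete {f1 f2 : String} (hne : f1 ≠ f2) :
    ∀ (r : List String) (k : Nat), r.count f2 = k → (∀ c ∈ r, c = f1 ∨ c = f2) →
      r ∈ pvRowsB f1 f2 r.length k := by
  intro r
  induction r with
  | nil =>
    intro k hk _
    simp only [List.count_nil] at hk
    subst hk
    simp [pvRowsB_zero]
  | cons c r ih =>
    intro k hk hb
    have hbr : ∀ x ∈ r, x = f1 ∨ x = f2 := fun x hx => hb x (List.mem_cons_of_mem _ hx)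
    rcases hb c List.mem_cons_self with hc | hc
    · rw [hc] at hk ⊢
      rw [pv_count_cons_ne hne] at hk
      match k, hk with
      | 0, hk =>
        have hall : ∀ x ∈ r, x = f1 := by
          intro x hx
          rcases hbr x hx with h | h
          · exact h
          · exfalso
            rw [h] at hx
            exact absurd (List.count_pos_iff.mpr hx) (by omega)
        have hrepl : r = List.replicate r.length f1 := List.eq_replicate_of_mem hall
        rw [List.length_cons, pvRowsB_zero]
        refine List.mem_singleton.mpr ?_
        rw [List.replicate_succ, ← hrepl]
      | k+1, hk =>
        have hkm : k + 1 ≤ r.length := by rw [← hk]; exact List.count_le_length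
        rw [List.length_cons, pvRowsB_succ f1 f2 (by omega : k ≤ r.length)]
        exact List.mem_append_right _ (List.mem_map.mpr ⟨r, ih (k+1) hk hbr, rfl⟩)
    · rw [hc] at hk ⊢
      rw [pv_count_cons_self] at hk
      match k, hk with
      | k+1, hk =>
        have hcnt : r.count f2 = k := by omega
        have hkm : k ≤ r.length := by rw [← hcnt]; exact List.count_le_length
        rw [List.length_cons, pvRowsB_succ f1 f2 hkm]
        exact List.mem_append_left _ (List.mem_map.mpr ⟨r, ih k hcnt hbr, rfl⟩)

-- ---- the discovery order ----

theorem pvRlt_asymm {f1 f2 : String} (hne : f1 ≠ f2) :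
    ∀ {x y : List String}, pvRlt f1 f2 x y → pvRlt f1 f2 y x → False := by
  intro x y h1
  induction h1 with
  | head r s =>
    intro h2
    cases h2 with
    | head => exact hne rfl
    | cons => exact hne rfl
  | cons c h ih =>
    intro h2
    cases h2 with
    | head => exact hne rfl
    | cons _ h' => exact ih h'

theorem pvRlt_append (f1 f2 : String) :
    ∀ (u x y : List String), pvRlt f1 f2 (u ++ f2 :: x) (u ++ f1 :: y) := by
  intro u
  induction u with
  | nil => intro x y; exact pvRlt.head x y
  | cons c u ih => intro x y; exact pvRlt.cons c (ih x y)

theorem pvRows_pairwise (f1 f2 : String) :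
    ∀ (m k : Nat), (pvRowsB f1 f2 m k).Pairwise (pvRlt f1 f2) := by
  intro m
  induction m with
  | zero =>
    intro k
    match k with
    | 0 => simp [pvRowsB_zero]
    | k+1 => simp [pvRowsB]
  | succ m ih =>
    intro k
    match k with
    | 0 => simp [pvRowsB_zero]
    | k+1 =>
      by_cases hk : k ≤ m
      · rw [pvRowsB_succ f1 f2 hk, List.pairwise_append]
        refine ⟨?_, ?_, ?_⟩
        · exact (List.pairwise_map).mpr ((ih k).imp (fun h => pvRlt.cons f2 h))
        · exact (List.pairwise_map).mpr ((ih (k+1)).imp (fun h => pvRlt.cons f1 h))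
        · intro a ha b hb
          obtain ⟨ra, _, rfl⟩ := List.mem_map.mp ha
          obtain ⟨rb, _, rfl⟩ := List.mem_map.mp hb
          exact pvRlt.head ra rb
      · rw [pvRowsB_nil f1 f2 (by omega)]; simp

theorem pvQlt_asymm {f1 f2 : String} (hne : f1 ≠ f2) {x y : List String} :
    pvQlt f1 f2 x y → pvQlt f1 f2 y x → False := by
  intro h1 h2
  rcases h1 with h1 | ⟨e1, r1⟩ <;> rcases h2 with h2 | ⟨e2, r2⟩
  · omega
  · omega
  · omega
  · exact pvRlt_asymm hne r1 r2

theorem pvQlt_irrefl {f1 f2 : String} (hne : f1 ≠ f2) {x : List String} :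
    ¬ pvQlt f1 f2 x x := fun h => pvQlt_asymm hne h h

theorem pvQ_pairwise {f1 f2 : String} (hne : f1 ≠ f2) (n : Nat) :
    (pvQ f1 f2 n).Pairwise (pvQlt f1 f2) := by
  rw [pvQ]
  rw [List.pairwise_flatten]
  refine ⟨?_, ?_⟩
  · intro l hl
    obtain ⟨k, _, rfl⟩ := List.mem_map.mp hl
    refine List.Pairwise.imp_of_mem ?_ (pvRows_pairwise f1 f2 n k)
    intro a b ha hb hr
    exact Or.inr ⟨by rw [(pvRows_mem hne ha).2.1, (pvRows_mem hne hb).2.1], hr⟩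
  · rw [List.pairwise_map]
    refine List.Pairwise.imp_of_mem ?_ (List.pairwise_lt_range)
    intro k1 k2 _ _ hk x hx y hy
    exact Or.inl (by rw [(pvRows_mem hne hx).2.1, (pvRows_mem hne hy).2.1]; exact hk)

theorem pvQ_nodup {f1 f2 : String} (hne : f1 ≠ f2) (n : Nat) : (pvQ f1 f2 n).Nodup := by
  refine (pvQ_pairwise hne n).imp ?_
  intro a b hab
  intro h
  rw [h] at hab
  exact pvQlt_irrefl hne hab

theorem pvQ_mem_of {f1 f2 : String} (hne : f1 ≠ f2) {n : Nat} {r : List String}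
    (hlen : r.length = n) (hb : ∀ c ∈ r, c = f1 ∨ c = f2) : r ∈ pvQ f1 f2 n := by
  rw [pvQ, List.mem_flatten]
  refine ⟨pvRowsB f1 f2 n (r.count f2), List.mem_map.mpr ⟨r.count f2, ?_, rfl⟩, ?_⟩
  · rw [List.mem_range]
    have := List.count_le_length (a := f2) (l := r)
    omega
  · have := pvRows_complete hne r (r.count f2) rfl hb
    rwa [hlen] at this

theorem pvQ_mem {f1 f2 : String} (hne : f1 ≠ f2) {n : Nat} {r : List String}
    (hr : r ∈ pvQ f1 f2 n) : r.length = n ∧ ∀ c ∈ r, c = f1 ∨ c = f2 := by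
  rw [pvQ, List.mem_flatten] at hr
  obtain ⟨l, hl, hrl⟩ := hr
  obtain ⟨k, _, rfl⟩ := List.mem_map.mp hl
  exact ⟨(pvRows_mem hne hrl).1, (pvRows_mem hne hrl).2.2.2⟩

-- ---- facts about pvNc and pvBack ----

theorem pvNc_count {f2 : String} :
    ∀ {S t : List String}, t ∈ pvNc f2 S → t.count f2 = S.count f2 + 1 ∧ t.length = S.length := by
  intro S
  induction S with
  | nil => intro t ht; simp [pvNc] at ht
  | cons c r ih =>
    intro t ht
    simp only [pvNc] at ht
    by_cases hc : c = f2
    · rw [if_pos hc] at ht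
      obtain ⟨t', ht', rfl⟩ := List.mem_map.mp ht
      obtain ⟨h1, h2⟩ := ih ht'
      subst hc
      exact ⟨by rw [pv_count_cons_self, pv_count_cons_self, h1], by simp [h2]⟩
    · rw [if_neg hc] at ht
      by_cases hr : f2 ∈ r
      · rw [if_pos hr] at ht
        obtain ⟨t', ht', rfl⟩ := List.mem_map.mp ht
        obtain ⟨h1, h2⟩ := ih ht'
        exact ⟨by rw [pv_count_cons_ne hc, pv_count_cons_ne hc, h1], by simp [h2]⟩
      · rw [if_neg hr] at ht
        simp only [List.mem_cons] at ht
        rcases ht with rfl | ht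
        · exact ⟨by rw [pv_count_cons_self, pv_count_cons_ne hc], by simp⟩
        · obtain ⟨t', ht', rfl⟩ := List.mem_map.mp ht
          obtain ⟨h1, h2⟩ := ih ht'
          exact ⟨by rw [pv_count_cons_ne hc, pv_count_cons_ne hc, h1], by simp [h2]⟩

theorem pvNc_mem_f2 {f2 : String} {S t : List String} (ht : t ∈ pvNc f2 S) : f2 ∈ t := by
  have h := (pvNc_count ht).1
  exact List.count_pos_iff.mp (by omega)

theorem pvNc_back {f1 f2 : String} (hne : f1 ≠ f2) :
    ∀ {S : List String}, (∀ c ∈ S, c = f1 ∨ c = f2) →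
      ∀ {t : List String}, t ∈ pvNc f2 S → pvBack f1 f2 t = S := by
  intro S
  induction S with
  | nil => intro _ t ht; simp [pvNc] at ht
  | cons c r ih =>
    intro hb t ht
    have hbr : ∀ x ∈ r, x = f1 ∨ x = f2 := fun x hx => hb x (List.mem_cons_of_mem _ hx)
    simp only [pvNc] at ht
    by_cases hc : c = f2
    · rw [if_pos hc] at ht
      obtain ⟨t', ht', rfl⟩ := List.mem_map.mp ht
      simp only [pvBack]; rw [if_pos (pvNc_mem_f2 ht'), ih hbr ht', hc]
    · rw [if_neg hc] at ht
      by_cases hr : f2 ∈ r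
      · rw [if_pos hr] at ht
        obtain ⟨t', ht', rfl⟩ := List.mem_map.mp ht
        simp only [pvBack]; rw [if_pos (pvNc_mem_f2 ht'), ih hbr ht']
      · rw [if_neg hr] at ht
        have hc1 : c = f1 := by
          rcases hb c List.mem_cons_self with h | h
          · exact h
          · exact absurd h hc
        simp only [List.mem_cons] at ht
        rcases ht with rfl | ht
        · simp only [pvBack]
          rw [if_neg hr]
          simp [hc1]
        · obtain ⟨t', ht', rfl⟩ := List.mem_map.mp ht
          simp only [pvBack]; rw [if_pos (pvNc_mem_f2 ht'), ih hbr ht']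

theorem pvBack_mem_nc {f1 f2 : String} (hne : f1 ≠ f2) :
    ∀ {t : List String}, f2 ∈ t → t ∈ pvNc f2 (pvBack f1 f2 t) := by
  intro t
  induction t with
  | nil => intro h; simp at h
  | cons c r ih =>
    intro h
    by_cases hr : f2 ∈ r
    · simp only [pvBack]; rw [if_pos hr]
      simp only [pvNc]
      by_cases hc : c = f2
      · subst hc
        rw [if_pos rfl]
        exact List.mem_map.mpr ⟨r, ih hr, rfl⟩
      · rw [if_neg hc]
        by_cases hbr : f2 ∈ pvBack f1 f2 r
        · rw [if_pos hbr]
          exact List.mem_map.mpr ⟨r, ih hr, rfl⟩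
        · rw [if_neg hbr]
          exact List.mem_cons_of_mem _ (List.mem_map.mpr ⟨r, ih hr, rfl⟩)
    · have hc : c = f2 := by
        simp only [List.mem_cons] at h
        rcases h with h | h
        · exact h.symm
        · exact absurd h hr
      simp only [pvBack]; rw [if_neg hr, if_pos hc]
      simp only [pvNc]
      rw [if_neg (fun h => hne h), if_neg hr]
      rw [hc]
      exact List.mem_cons_self

theorem pvBack_prefix {f1 f2 : String} :
    ∀ (u : List String) (c : String) (v : List String), f2 ∈ v →
      pvBack f1 f2 (u ++ c :: v) = u ++ c :: pvBack f1 f2 v := by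
  intro u
  induction u with
  | nil =>
    intro c v hv
    rw [List.nil_append]
    simp only [pvBack]
    rw [if_pos hv, List.nil_append]
  | cons a u ih =>
    intro c v hv
    rw [List.cons_append]
    simp only [pvBack]
    rw [if_pos (List.mem_append_right u (List.mem_cons_of_mem _ hv)), ih c v hv,
        List.cons_append]

theorem pvBack_length {f1 f2 : String} :
    ∀ (t : List String), (pvBack f1 f2 t).length = t.length := by
  intro t
  induction t with
  | nil => rfl
  | cons c r ih =>
    simp only [pvBack]
    split
    · simp [ih]
    · split <;> simp

theorem pvBack_binary {f1 f2 : String} :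
    ∀ {t : List String}, (∀ c ∈ t, c = f1 ∨ c = f2) →
      ∀ c ∈ pvBack f1 f2 t, c = f1 ∨ c = f2 := by
  intro t
  induction t with
  | nil => intro _ c hc; simp [pvBack] at hc
  | cons a r ih =>
    intro hb c hc
    have hbr : ∀ x ∈ r, x = f1 ∨ x = f2 := fun x hx => hb x (List.mem_cons_of_mem _ hx)
    simp only [pvBack] at hc
    split at hc
    · simp only [List.mem_cons] at hc
      rcases hc with rfl | hc
      · exact hb c List.mem_cons_self
      · exact ih hbr c hc
    · split at hc
      · simp only [List.mem_cons] at hc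
        rcases hc with rfl | hc
        · left; rfl
        · exact hbr c hc
      · simp only [List.mem_cons] at hc
        rcases hc with rfl | hc
        · exact hb c List.mem_cons_self
        · exact hbr c hc

theorem pvBack_count {f1 f2 : String} (hne : f1 ≠ f2) :
    ∀ {t : List String}, f2 ∈ t → (pvBack f1 f2 t).count f2 + 1 = t.count f2 := by
  intro t
  induction t with
  | nil => intro h; simp at h
  | cons c r ih =>
    intro h
    by_cases hr : f2 ∈ r
    · simp only [pvBack]; rw [if_pos hr]
      by_cases hc : c = f2
      · subst hc
        rw [pv_count_cons_self, pv_count_cons_self, ← ih hr]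
      · rw [pv_count_cons_ne hc, pv_count_cons_ne hc, ← ih hr]
    · have hc : c = f2 := by
        simp only [List.mem_cons] at h
        rcases h with h | h
        · exact h.symm
        · exact absurd h hr
      simp only [pvBack]; rw [if_neg hr, if_pos hc, hc]
      rw [pv_count_cons_ne (fun h => hne h), pv_count_cons_self]

-- ---- the level fixpoint ----

theorem pvNc_replicate {f1 f2 : String} (hne : f1 ≠ f2) :
    ∀ (m : Nat), pvNc f2 (List.replicate m f1) = pvRowsB f1 f2 m 1 := by
  intro m
  induction m with
  | zero => rfl
  | succ m ih =>
    rw [List.replicate_succ]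
    simp only [pvNc]
    rw [if_neg (fun h => hne h),
        if_neg (by rw [List.mem_replicate]; rintro ⟨-, h⟩; exact hne h.symm)]
    rw [ih, pvRowsB_succ f1 f2 (Nat.zero_le m), pvRowsB_zero]
    simp [List.replicate_succ]

theorem pvNc_cons_f2 (f2 : String) (r : List String) :
    pvNc f2 (f2 :: r) = (pvNc f2 r).map (f2 :: ·) := by
  simp [pvNc]

theorem pvNc_cons_mem2 {f2 c : String} (hc : c ≠ f2) {r : List String} (hr : f2 ∈ r) :
    pvNc f2 (c :: r) = (pvNc f2 r).map (c :: ·) := by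
  simp only [pvNc]
  rw [if_neg hc, if_pos hr]

theorem pvNc_level {f1 f2 : String} (hne : f1 ≠ f2) :
    ∀ (m k : Nat), (pvRowsB f1 f2 m k).flatMap (pvNc f2) = pvRowsB f1 f2 m (k+1) := by
  intro m
  induction m with
  | zero =>
    intro k
    match k with
    | 0 => simp [pvRowsB_zero, pvNc, pvRowsB]
    | k+1 => simp [pvRowsB]
  | succ m ih =>
    intro k
    match k with
    | 0 =>
      rw [pvRowsB_zero]
      simp only [List.flatMap_cons, List.flatMap_nil, List.append_nil]
      exact pvNc_replicate hne (m+1)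
    | k+1 =>
      by_cases hk : k ≤ m
      · rw [pvRowsB_succ f1 f2 hk, List.flatMap_append]
        have h1 : ((pvRowsB f1 f2 m k).map (f2 :: ·)).flatMap (pvNc f2)
            = ((pvRowsB f1 f2 m (k+1)).map (f2 :: ·)) := by
          rw [List.flatMap_map]
          calc (pvRowsB f1 f2 m k).flatMap (fun r => pvNc f2 (f2 :: r))
              = (pvRowsB f1 f2 m k).flatMap (fun r => (pvNc f2 r).map (f2 :: ·)) := by
                simp only [pvNc_cons_f2]
            _ = ((pvRowsB f1 f2 m k).flatMap (pvNc f2)).map (f2 :: ·) := by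
                rw [List.map_flatMap]
            _ = ((pvRowsB f1 f2 m (k+1)).map (f2 :: ·)) := by rw [ih k]
        by_cases hk1 : k + 1 ≤ m
        · have h2 : ((pvRowsB f1 f2 m (k+1)).map (f1 :: ·)).flatMap (pvNc f2)
              = ((pvRowsB f1 f2 m (k+2)).map (f1 :: ·)) := by
            rw [List.flatMap_map]
            have heq : ∀ r ∈ pvRowsB f1 f2 m (k+1),
                pvNc f2 (f1 :: r) = (pvNc f2 r).map (f1 :: ·) := by
              intro r hrm
              have hcnt := (pvRows_mem hne hrm).2.1
              exact pvNc_cons_mem2 (fun h => hne h) (List.count_pos_iff.mp (by omega))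
            calc (pvRowsB f1 f2 m (k+1)).flatMap (fun r => pvNc f2 (f1 :: r))
                = (pvRowsB f1 f2 m (k+1)).flatMap (fun r => (pvNc f2 r).map (f1 :: ·)) :=
                  List.flatMap_congr heq
              _ = ((pvRowsB f1 f2 m (k+1)).flatMap (pvNc f2)).map (f1 :: ·) := by
                  rw [List.map_flatMap]
              _ = ((pvRowsB f1 f2 m (k+2)).map (f1 :: ·)) := by rw [ih (k+1)]
          rw [h1, h2, ← pvRowsB_succ f1 f2 hk1]
        · have hm : m = k := by omega
          subst hm
          rw [pvRowsB_nil f1 f2 (by omega : m+1 < m+2)]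
          rw [h1]
          rw [pvRowsB_nil f1 f2 (by omega : m < m+1)]
          simp
      · rw [pvRowsB_nil f1 f2 (by omega : m+1 < k+1),
            pvRowsB_nil f1 f2 (by omega : m+1 < k+2)]
        rfl

theorem pvQ_tail {f1 f2 : String} (hne : f1 ≠ f2) (n : Nat) :
    (pvQ f1 f2 n).flatMap (pvNc f2)
      = ((List.range n).map (fun k => pvRowsB f1 f2 n (k+1))).flatten := by
  rw [pvQ, ← List.flatMap_def, List.flatMap_assoc]
  have h1 : (List.range (n+1)).flatMap (fun k => (pvRowsB f1 f2 n k).flatMap (pvNc f2))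
      = (List.range (n+1)).flatMap (fun k => pvRowsB f1 f2 n (k+1)) :=
    List.flatMap_congr (fun k _ => pvNc_level hne n k)
  rw [h1, List.range_succ, List.flatMap_append]
  have h2 : ([n] : List Nat).flatMap (fun k => pvRowsB f1 f2 n (k+1)) = [] := by
    simp [pvRowsB_nil f1 f2 (by omega : n < n+1)]
  rw [h2, List.append_nil, List.flatMap_def]

theorem pvQ_fix {f1 f2 : String} (hne : f1 ≠ f2) (n : Nat) :
    pvQ f1 f2 n = List.replicate n f1 :: (pvQ f1 f2 n).flatMap (pvNc f2) := by
  rw [pvQ_tail hne n]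
  rw [pvQ, List.range_succ_eq_map, List.map_cons, List.flatten_cons, List.map_map]
  rw [pvRowsB_zero]
  rfl

theorem pvRows_length (f1 f2 : String) :
    ∀ (m k : Nat), (pvRowsB f1 f2 m k).length = m.choose k := by
  intro m
  induction m with
  | zero =>
    intro k
    match k with
    | 0 => rfl
    | k+1 => rfl
  | succ m ih =>
    intro k
    match k with
    | 0 => simp [pvRowsB_zero]
    | k+1 =>
      by_cases hk : k ≤ m
      · rw [pvRowsB_succ f1 f2 hk]
        simp [ih k, ih (k+1), Nat.choose_succ_succ]
      · rw [pvRowsB_nil f1 f2 (by omega), Nat.choose_eq_zero_of_lt (by omega)]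
        rfl

theorem pv_sum_range (f : Nat → Nat) :
    ∀ (n : Nat), ((List.range n).map f).sum = ∑ i ∈ Finset.range n, f i := by
  intro n
  induction n with
  | zero => simp
  | succ n ih => rw [List.range_succ, Finset.sum_range_succ, List.map_append, List.sum_append, ih]; simp

theorem pvQ_length (f1 f2 : String) (n : Nat) : (pvQ f1 f2 n).length = 2 ^ n := by
  rw [pvQ, List.length_flatten, List.map_map]
  have h1 : (List.length ∘ fun k => pvRowsB f1 f2 n k) = fun k => n.choose k := by
    funext k; exact pvRows_length f1 f2 n k
  rw [h1, pv_sum_range, Nat.sum_range_choose]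

-- ---- bridging A's inner loop to pvStep ----

theorem pvInnerA_of_mem (anz_1 anz_2 : Int) (farbe1 farbe2 : String) (tubel : List String)
    (fuel k : Nat) (omega1 omega : List (List String)) (h : tubel ∈ omega1) :
    pvInnerA anz_1 anz_2 farbe1 farbe2 tubel fuel k (omega1, omega) = (omega1, omega) := by
  induction fuel generalizing k with
  | zero => rfl
  | succ n ih =>
    simp only [pvInnerA, h, not_true_eq_false, if_false]
    split
    · exact ih (k+1)
    · rfl

theorem pvInnerA_step (anz_1 anz_2 : Int) (farbe1 farbe2 : String) (tubel : List String)
    (omega1 omega : List (List String)) (hne : omega1 ≠ []) :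
    pvInnerA anz_1 anz_2 farbe1 farbe2 tubel (omega1.length + 1) 0 (omega1, omega) =
      if tubel ∈ omega1 then (omega1, omega)
      else (omega1 ++ [tubel],
            if (PySem.List.count tubel farbe2 : Int) ≤ anz_2 ∧ (PySem.List.count tubel farbe1 : Int) ≤ anz_1
            then omega ++ [tubel] else omega) := by
  by_cases h : tubel ∈ omega1
  · rw [if_pos h, pvInnerA_of_mem _ _ _ _ _ _ _ _ _ h]
  · rw [if_neg h]
    have hlen : 0 < omega1.length := List.length_pos_iff.mpr hne
    simp only [pvInnerA, if_pos hlen, if_pos h]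
    exact pvInnerA_of_mem _ _ _ _ _ _ _ _ _ (by simp)

theorem pvInnerA_eq_step (anz_1 anz_2 : Int) (farbe1 farbe2 : String) (t : List String)
    (st : List (List String) × List (List String)) (h : st.1 ≠ []) :
    pvInnerA anz_1 anz_2 farbe1 farbe2 t (st.1.length + 1) 0 st
      = pvStep anz_1 anz_2 farbe1 farbe2 st t := by
  obtain ⟨W, O⟩ := st
  rw [pvInnerA_step anz_1 anz_2 farbe1 farbe2 t W O h]
  rfl

theorem pvStep_fst_ne (anz_1 anz_2 : Int) (farbe1 farbe2 : String) (t : List String)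
    (st : List (List String) × List (List String)) (h : st.1 ≠ []) :
    (pvStep anz_1 anz_2 farbe1 farbe2 st t).1 ≠ [] := by
  simp only [pvStep]
  split
  · exact h
  · simp

theorem pv_fold_inner_eq_step (anz_1 anz_2 : Int) (farbe1 farbe2 : String) (S : List String) :
    ∀ (l : List Nat) (st : List (List String) × List (List String)), st.1 ≠ [] →
      l.foldl (fun st i => pvInnerA anz_1 anz_2 farbe1 farbe2 (S.set i farbe2) (st.1.length + 1) 0 st) st
        = l.foldl (fun st i => pvStep anz_1 anz_2 farbe1 farbe2 st (S.set i farbe2)) st := by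
  intro l
  induction l with
  | nil => intro st _; rfl
  | cons i l ih =>
    intro st h
    rw [List.foldl_cons, List.foldl_cons, pvInnerA_eq_step anz_1 anz_2 farbe1 farbe2 _ st h]
    exact ih _ (pvStep_fst_ne anz_1 anz_2 farbe1 farbe2 _ st h)

theorem pv_fold_step_eq_midRec (anz_1 anz_2 : Int) (farbe1 farbe2 : String) :
    ∀ (S pre : List String) (st : List (List String) × List (List String)),
      (List.range S.length).foldl
          (fun st i => pvStep anz_1 anz_2 farbe1 farbe2 st (pre ++ S.set i farbe2)) st
        = pvMidRec anz_1 anz_2 farbe1 farbe2 pre S st := by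
  intro S
  induction S with
  | nil => intro pre st; rfl
  | cons c r ih =>
    intro pre st
    rw [List.length_cons, List.range_succ_eq_map, List.foldl_cons, List.foldl_map]
    simp only [List.set_cons_zero, List.set_cons_succ, Nat.succ_eq_add_one]
    simp only [pvMidRec]
    have := ih (pre ++ [c]) (pvStep anz_1 anz_2 farbe1 farbe2 st (pre ++ farbe2 :: r))
    simp only [List.append_assoc, List.singleton_append] at this
    exact this

theorem pvMidA_eq (anz_1 anz_2 : Int) (farbe1 farbe2 : String) (anzahl : List String)
    (st : List (List String) × List (List String)) (h : st.1 ≠ []) :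
    pvMidA anz_1 anz_2 farbe1 farbe2 anzahl st = pvMidRec anz_1 anz_2 farbe1 farbe2 [] anzahl st := by
  rw [pvMidA]
  rw [pv_fold_inner_eq_step anz_1 anz_2 farbe1 farbe2 anzahl _ st h]
  have := pv_fold_step_eq_midRec anz_1 anz_2 farbe1 farbe2 anzahl [] st
  simpa only [List.nil_append] using this

-- ---- the middle-loop specification ----

theorem pvMidRec_spec (anz_1 anz_2 : Int) {f1 f2 : String} (hne : f1 ≠ f2) :
    ∀ (S pre : List String) (W O : List (List String)),
      (∀ t ∈ pvNc f2 S, (pre ++ t) ∉ W) →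
      (∀ u c v, S = u ++ c :: v → c ≠ f2 → f2 ∈ v → (pre ++ (u ++ f2 :: v)) ∈ W) →
      ((pre ++ S) ∈ W) →
      pvMidRec anz_1 anz_2 f1 f2 pre S (W, O)
        = (W ++ (pvNc f2 S).map (pre ++ ·),
           O ++ ((pvNc f2 S).map (pre ++ ·)).filter (pvOk anz_1 anz_2 f1 f2)) := by
  intro S
  induction S with
  | nil =>
    intro pre W O _ _ _
    simp [pvMidRec, pvNc]
  | cons c r ih =>
    intro pre W O h1 h2 h3
    simp only [pvMidRec]
    by_cases hc : c = f2
    · rw [hc] at h1 h2 h3 ⊢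
      simp only [pvStep]
      rw [if_pos h3]
      rw [ih (pre ++ [f2]) W O ?ha ?hb ?hcc]
      case ha =>
        intro t' ht' hmem'
        refine h1 (f2 :: t') ?_ (by simpa using hmem')
        rw [pvNc_cons_f2]
        exact List.mem_map.mpr ⟨t', ht', rfl⟩
      case hb =>
        intro u c' v hre hcne hfv
        have := h2 (f2 :: u) c' v (by rw [hre]; rfl) hcne hfv
        simpa using this
      case hcc => simpa using h3
      rw [pvNc_cons_f2]
      simp [List.map_map, Function.comp_def]
    · by_cases hr : f2 ∈ r
      · have hmem : pre ++ f2 :: r ∈ W := by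
          have := h2 [] c r rfl hc hr
          simpa using this
        simp only [pvStep]
        rw [if_pos hmem]
        rw [ih (pre ++ [c]) W O ?ha ?hb ?hcc]
        case ha =>
          intro t' ht' hmem'
          refine h1 (c :: t') ?_ (by simpa using hmem')
          rw [pvNc_cons_mem2 hc hr]
          exact List.mem_map.mpr ⟨t', ht', rfl⟩
        case hb =>
          intro u c' v hre hcne hfv
          have := h2 (c :: u) c' v (by rw [hre]; rfl) hcne hfv
          simpa using this
        case hcc => simpa using h3
        rw [pvNc_cons_mem2 hc hr]
        simp [List.map_map, Function.comp_def]
      · -- new child at the head position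
        have hnc : pvNc f2 (c :: r) = (f2 :: r) :: (pvNc f2 r).map (c :: ·) := by
          simp only [pvNc]
          rw [if_neg hc, if_neg hr]
        have ht0 : (f2 :: r) ∈ pvNc f2 (c :: r) := by rw [hnc]; exact List.mem_cons_self
        have hnotin : pre ++ f2 :: r ∉ W := h1 _ ht0
        simp only [pvStep]
        rw [if_neg hnotin]
        rw [ih (pre ++ [c]) (W ++ [pre ++ f2 :: r]) _ ?ha ?hb ?hcc]
        case ha =>
          intro t' ht' hmem'
          rcases List.mem_append.mp hmem' with hW | hsingle
          · refine h1 (c :: t') ?_ (by simpa using hW)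
            rw [hnc]
            exact List.mem_cons_of_mem _ (List.mem_map.mpr ⟨t', ht', rfl⟩)
          · have heq := List.mem_singleton.mp hsingle
            have : (c :: t') = (f2 :: r) := by
              have h' : pre ++ c :: t' = pre ++ f2 :: r := by simpa using heq
              exact List.append_cancel_left h'
            injection this with hh _
            exact hc hh
        case hb =>
          intro u c' v hre hcne hfv
          have := h2 (c :: u) c' v (by rw [hre]; rfl) hcne hfv
          exact List.mem_append_left _ (by simpa using this)
        case hcc =>
          exact List.mem_append_left _ (by simpa using h3)
        rw [hnc]
        by_cases hok : (PySem.List.count (pre ++ f2 :: r) f2 : Int) ≤ anz_2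
            ∧ (PySem.List.count (pre ++ f2 :: r) f1 : Int) ≤ anz_1
        · rw [if_pos hok]
          simp only [List.map_cons, List.filter_cons]
          rw [if_pos (by simp only [pvOk, decide_eq_true_eq]; exact hok)]
          simp [List.map_map, Function.comp_def]
        · rw [if_neg hok]
          simp only [List.map_cons, List.filter_cons]
          rw [if_neg (by simp only [pvOk, decide_eq_true_eq]; exact hok)]
          simp [List.map_map, Function.comp_def]

-- ---- the outer-loop invariant ----

theorem pv_flatMap_take_prefix {α β : Type} (g : α → List β) (l : List α) (j : Nat) :
    (l.take j).flatMap g <+: l.flatMap g :=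
  ⟨(l.drop j).flatMap g, by rw [← List.flatMap_append, List.take_append_drop]⟩

theorem pv_idx {f1 f2 : String} (hne : f1 ≠ f2) {l : List (List String)}
    (hP : l.Pairwise (pvQlt f1 f2)) {j : Nat} (hj : j < l.length) {p : List String}
    (hp : p ∈ l) (hlt : pvQlt f1 f2 p (l[j]'hj)) : p ∈ l.take j := by
  obtain ⟨m, hm, rfl⟩ := List.getElem_of_mem hp
  rcases lt_trichotomy m j with h | h | h
  · have hmt : m < (l.take j).length := by simp [List.length_take]; omega
    have : (l.take j)[m]'hmt = l[m]'hm := List.getElem_take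
    rw [← this]
    exact List.getElem_mem _
  · subst h
    exact absurd hlt (pvQlt_irrefl hne)
  · exact absurd hlt (fun _ => pvQlt_asymm hne hlt
      ((List.pairwise_iff_getElem.mp hP) j m hj hm h))

theorem pv_lb {f1 f2 : String} (hne : f1 ≠ f2) (n : Nat) :
    ∀ j, j < (pvQ f1 f2 n).length → j ≤ (((pvQ f1 f2 n).take j).flatMap (pvNc f2)).length := by
  intro j hj
  have hfix := pvQ_fix hne n
  have hsub : (((pvQ f1 f2 n).drop 1).take j) ⊆ ((pvQ f1 f2 n).take j).flatMap (pvNc f2) := by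
    intro x hx
    obtain ⟨i, hi, rfl⟩ := List.getElem_of_mem hx
    have hi' : i < j := by simp [List.length_take] at hi; omega
    have hi2 : 1 + i < (pvQ f1 f2 n).length := by
      simp [List.length_take, List.length_drop] at hi; omega
    have hx2 : (((pvQ f1 f2 n).drop 1).take j)[i]'hi = (pvQ f1 f2 n)[1+i]'hi2 := by
      rw [List.getElem_take, List.getElem_drop]
    rw [hx2]
    set x := (pvQ f1 f2 n)[1+i]'hi2 with hxdef
    -- x appears in the tail, so it is some nc-child and contains f2
    have hxtail : x ∈ (pvQ f1 f2 n).flatMap (pvNc f2) := by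
      have hq : (pvQ f1 f2 n)[1+i]? = some x := by
        rw [hxdef]; exact List.getElem?_eq_getElem hi2
      rw [hfix] at hq
      rw [show 1 + i = i + 1 from Nat.add_comm 1 i, List.getElem?_cons_succ] at hq
      exact List.mem_of_getElem? hq
    have hf2x : f2 ∈ x := by
      obtain ⟨y, _, hxy⟩ := List.mem_flatMap.mp hxtail
      exact pvNc_mem_f2 hxy
    have hxQ : x ∈ pvQ f1 f2 n := List.getElem_mem _
    obtain ⟨hxlen, hxbin⟩ := pvQ_mem hne hxQ
    -- canonical parent
    have hPmem : x ∈ pvNc f2 (pvBack f1 f2 x) := pvBack_mem_nc hne hf2x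
    have hPQ : pvBack f1 f2 x ∈ pvQ f1 f2 n :=
      pvQ_mem_of hne (by rw [pvBack_length, hxlen]) (pvBack_binary hxbin)
    have hPlt : pvQlt f1 f2 (pvBack f1 f2 x) x :=
      Or.inl (by have := pvBack_count hne hf2x; omega)
    have hPtake : pvBack f1 f2 x ∈ (pvQ f1 f2 n).take (1+i) :=
      pv_idx hne (pvQ_pairwise hne n) hi2 hPQ hPlt
    have hPtake' : pvBack f1 f2 x ∈ (pvQ f1 f2 n).take j :=
      List.take_prefix_take_left (by omega : 1+i ≤ j) |>.subset hPtake
    exact List.mem_flatMap.mpr ⟨pvBack f1 f2 x, hPtake', hPmem⟩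
  have hnodup : (((pvQ f1 f2 n).drop 1).take j).Nodup :=
    ((List.take_sublist _ _).trans (List.drop_sublist _ _)).nodup (pvQ_nodup hne n)
  have hlen1 : (((pvQ f1 f2 n).drop 1).take j).length = j := by
    simp [List.length_take, List.length_drop]; omega
  calc j = (((pvQ f1 f2 n).drop 1).take j).length := hlen1.symm
    _ = (((pvQ f1 f2 n).drop 1).take j).toFinset.card := (List.toFinset_card_of_nodup hnodup).symm
    _ ≤ (((pvQ f1 f2 n).take j).flatMap (pvNc f2)).toFinset.card :=
        Finset.card_le_card (fun x hx => List.mem_toFinset.mpr (hsub (List.mem_toFinset.mp hx)))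
    _ ≤ _ := List.toFinset_card_le _

theorem pv_h3 {f1 f2 : String} (hne : f1 ≠ f2) (n : Nat) {j : Nat}
    (hj : j < (pvQ f1 f2 n).length) :
    (pvQ f1 f2 n)[j]'hj
      ∈ List.replicate n f1 :: ((pvQ f1 f2 n).take j).flatMap (pvNc f2) := by
  have hfix := pvQ_fix hne n
  match j with
  | 0 =>
    have h0 : (pvQ f1 f2 n)[0]'hj = List.replicate n f1 := by
      have hq1 : (pvQ f1 f2 n)[0]? = some (List.replicate n f1) := by
        rw [hfix]; exact List.getElem?_cons_zero
      have hq2 : (pvQ f1 f2 n)[0]? = some ((pvQ f1 f2 n)[0]'hj) := List.getElem?_eq_getElem hj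
      exact Option.some_inj.mp (hq2.symm.trans hq1)
    rw [h0]
    exact List.mem_cons_self
  | k+1 =>
    have hlb := pv_lb hne n (k+1) hj
    have hk : k < (((pvQ f1 f2 n).take (k+1)).flatMap (pvNc f2)).length := by omega
    have hpre := pv_flatMap_take_prefix (pvNc f2) (pvQ f1 f2 n) (k+1)
    have hk2 : k < ((pvQ f1 f2 n).flatMap (pvNc f2)).length := by
      have := hpre.length_le
      omega
    have e1 : (((pvQ f1 f2 n).take (k+1)).flatMap (pvNc f2))[k]'hk
        = ((pvQ f1 f2 n).flatMap (pvNc f2))[k]'hk2 := hpre.getElem hk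
    have e2 : (pvQ f1 f2 n)[k+1]'hj = ((pvQ f1 f2 n).flatMap (pvNc f2))[k]'hk2 := by
      have hq1 : (pvQ f1 f2 n)[k+1]? = ((pvQ f1 f2 n).flatMap (pvNc f2))[k]? := by
        conv_lhs => rw [hfix]
        exact List.getElem?_cons_succ
      have hq2 : (pvQ f1 f2 n)[k+1]? = some ((pvQ f1 f2 n)[k+1]'hj) := List.getElem?_eq_getElem hj
      have hq3 : ((pvQ f1 f2 n).flatMap (pvNc f2))[k]? = some (((pvQ f1 f2 n).flatMap (pvNc f2))[k]'hk2) :=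
        List.getElem?_eq_getElem hk2
      exact Option.some_inj.mp ((hq2.symm.trans hq1).trans hq3)
    rw [e2, ← e1]
    exact List.mem_cons_of_mem _ (List.getElem_mem _)

theorem pv_h1 {f1 f2 : String} (hne : f1 ≠ f2) (n : Nat) {j : Nat}
    (hj : j < (pvQ f1 f2 n).length) :
    ∀ t ∈ pvNc f2 ((pvQ f1 f2 n)[j]'hj),
      t ∉ List.replicate n f1 :: ((pvQ f1 f2 n).take j).flatMap (pvNc f2) := by
  intro t ht hmem
  have hSQ : (pvQ f1 f2 n)[j]'hj ∈ pvQ f1 f2 n := List.getElem_mem _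
  obtain ⟨hSlen, hSbin⟩ := pvQ_mem hne hSQ
  simp only [List.mem_cons] at hmem
  rcases hmem with rfl | hmem
  · have hf2t := pvNc_mem_f2 ht
    rw [List.mem_replicate] at hf2t
    exact hne hf2t.2.symm
  · obtain ⟨y, hy, hty⟩ := List.mem_flatMap.mp hmem
    have hyQ : y ∈ pvQ f1 f2 n := List.take_subset _ _ hy
    obtain ⟨hylen, hybin⟩ := pvQ_mem hne hyQ
    have h1 : pvBack f1 f2 t = y := pvNc_back hne hybin hty
    have h2 : pvBack f1 f2 t = (pvQ f1 f2 n)[j]'hj := pvNc_back hne hSbin ht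
    -- y = Q[j] sits in Q.take j: contradiction with Nodup
    obtain ⟨m, hm, hmy⟩ := List.getElem_of_mem hy
    have hmj : m < j := by
      have := hm; simp [List.length_take] at this; omega
    have hm' : m < (pvQ f1 f2 n).length := by omega
    have hQm : (pvQ f1 f2 n)[m]'hm' = y := by
      rw [← hmy, List.getElem_take]
    have hQmj : (pvQ f1 f2 n)[m]'hm' = (pvQ f1 f2 n)[j]'hj := by
      rw [hQm, ← h1, h2]
    exact (List.pairwise_iff_getElem.mp (pvQ_nodup hne n)) m j hm' hj hmj hQmj

theorem pv_h2 {f1 f2 : String} (hne : f1 ≠ f2) (n : Nat) {j : Nat}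
    (hj : j < (pvQ f1 f2 n).length) :
    ∀ u c v, (pvQ f1 f2 n)[j]'hj = u ++ c :: v → c ≠ f2 → f2 ∈ v →
      (u ++ f2 :: v) ∈ List.replicate n f1 :: ((pvQ f1 f2 n).take j).flatMap (pvNc f2) := by
  intro u c v hsv hcne hfv
  have hSQ : (pvQ f1 f2 n)[j]'hj ∈ pvQ f1 f2 n := List.getElem_mem _
  obtain ⟨hSlen, hSbin⟩ := pvQ_mem hne hSQ
  have hcmem : c ∈ (pvQ f1 f2 n)[j]'hj := by
    rw [hsv]; exact List.mem_append_right _ List.mem_cons_self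
  have hc1 : c = f1 := by
    rcases hSbin c hcmem with h | h
    · exact h
    · exact absurd h hcne
  have hubin : ∀ x ∈ u, x = f1 ∨ x = f2 := by
    intro x hx
    exact hSbin x (by rw [hsv]; exact List.mem_append_left _ hx)
  have hvbin : ∀ x ∈ v, x = f1 ∨ x = f2 := by
    intro x hx
    exact hSbin x (by rw [hsv]; exact List.mem_append_right _ (List.mem_cons_of_mem _ hx))
  set t := u ++ f2 :: v with htdef
  have hft : f2 ∈ t := List.mem_append_right _ List.mem_cons_self
  have hback : pvBack f1 f2 t = u ++ f2 :: pvBack f1 f2 v := pvBack_prefix u f2 v hfv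
  have htP : t ∈ pvNc f2 (pvBack f1 f2 t) := pvBack_mem_nc hne hft
  have hPlen : (pvBack f1 f2 t).length = n := by
    rw [pvBack_length, htdef]
    have : (u ++ c :: v).length = n := by rw [← hsv, hSlen]
    simp at this ⊢
    omega
  have hPbin : ∀ x ∈ pvBack f1 f2 t, x = f1 ∨ x = f2 := by
    refine pvBack_binary ?_
    intro x hx
    rcases List.mem_append.mp hx with h | h
    · exact hubin x h
    · simp only [List.mem_cons] at h
      rcases h with rfl | h
      · right; rfl
      · exact hvbin x h
  have hPQ : pvBack f1 f2 t ∈ pvQ f1 f2 n := pvQ_mem_of hne hPlen hPbin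
  have hPlt : pvQlt f1 f2 (pvBack f1 f2 t) ((pvQ f1 f2 n)[j]'hj) := by
    refine Or.inr ⟨?_, ?_⟩
    · -- equal counts
      have hbc : (pvBack f1 f2 v).count f2 + 1 = v.count f2 := pvBack_count hne hfv
      rw [hback, hsv, hc1]
      rw [List.count_append, List.count_append, pv_count_cons_self, pv_count_cons_ne (fun h => hne h)]
      omega
    · rw [hback, hsv, hc1]
      exact pvRlt_append f1 f2 u (pvBack f1 f2 v) v
  have hPtake : pvBack f1 f2 t ∈ (pvQ f1 f2 n).take j :=
    pv_idx hne (pvQ_pairwise hne n) hj hPQ hPlt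
  exact List.mem_cons_of_mem _ (List.mem_flatMap.mpr ⟨pvBack f1 f2 t, hPtake, htP⟩)

theorem pvOuter_spec (anz_1 anz_2 : Int) {f1 f2 : String} (hne : f1 ≠ f2) (n : Nat) :
    ∀ (fuel j : Nat) (O0 : List (List String)),
      j ≤ (pvQ f1 f2 n).length → (pvQ f1 f2 n).length + 1 - j ≤ fuel →
      pvOuterA anz_1 anz_2 f1 f2 fuel j
        (List.replicate n f1 :: ((pvQ f1 f2 n).take j).flatMap (pvNc f2),
         O0 ++ (((pvQ f1 f2 n).take j).flatMap (pvNc f2)).filter (pvOk anz_1 anz_2 f1 f2))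
        = O0 ++ ((pvQ f1 f2 n).flatMap (pvNc f2)).filter (pvOk anz_1 anz_2 f1 f2) := by
  intro fuel
  induction fuel with
  | zero => intro j O0 hj hf; omega
  | succ fuel ih =>
    intro j O0 hj hf
    have hfix := pvQ_fix hne n
    have hQtaillen : (pvQ f1 f2 n).length = ((pvQ f1 f2 n).flatMap (pvNc f2)).length + 1 := by
      conv_lhs => rw [hfix]
      simp
    rcases eq_or_lt_of_le hj with hje | hjlt
    · -- finished: j = |Q|
      rw [hje, List.take_length]
      simp only [pvOuterA]
      rw [if_neg (by simp only [List.length_cons]; omega)]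
    · -- one more element to process
      have hlb := pv_lb hne n j hjlt
      have hWlen : j < (List.replicate n f1 :: ((pvQ f1 f2 n).take j).flatMap (pvNc f2)).length := by
        simp only [List.length_cons]; omega
      simp only [pvOuterA]
      rw [if_pos hWlen]
      have hpre : (List.replicate n f1 :: ((pvQ f1 f2 n).take j).flatMap (pvNc f2)) <+: pvQ f1 f2 n := by
        conv_rhs => rw [hfix]
        exact (List.cons_prefix_cons).mpr ⟨rfl, pv_flatMap_take_prefix _ _ _⟩
      have hget : (List.replicate n f1 :: ((pvQ f1 f2 n).take j).flatMap (pvNc f2)).getD j []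
          = (pvQ f1 f2 n)[j]'hjlt := by
        rw [List.getD_eq_getElem _ _ hWlen, hpre.getElem hWlen]
        rfl
      rw [hget]
      rw [pvMidA_eq anz_1 anz_2 f1 f2 _ _ (by simp)]
      rw [pvMidRec_spec anz_1 anz_2 hne ((pvQ f1 f2 n)[j]'hjlt) [] _ _
            (by intro t ht; simpa using pv_h1 hne n hjlt t ht)
            (by intro u c v h hc hv; simpa using pv_h2 hne n hjlt u c v h hc hv)
            (by simpa using pv_h3 hne n hjlt)]
      simp only [List.nil_append, List.map_id']
      have htake : (pvQ f1 f2 n).take (j+1)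
          = (pvQ f1 f2 n).take j ++ [(pvQ f1 f2 n)[j]'hjlt] := by
        rw [List.take_succ, List.getElem?_eq_getElem hjlt]
        rfl
      have hstate1 : (List.replicate n f1 :: ((pvQ f1 f2 n).take j).flatMap (pvNc f2))
            ++ pvNc f2 ((pvQ f1 f2 n)[j]'hjlt)
          = List.replicate n f1 :: ((pvQ f1 f2 n).take (j+1)).flatMap (pvNc f2) := by
        rw [htake, List.flatMap_append]
        simp
      have hstate2 : (O0 ++ (((pvQ f1 f2 n).take j).flatMap (pvNc f2)).filter (pvOk anz_1 anz_2 f1 f2))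
            ++ (pvNc f2 ((pvQ f1 f2 n)[j]'hjlt)).filter (pvOk anz_1 anz_2 f1 f2)
          = O0 ++ (((pvQ f1 f2 n).take (j+1)).flatMap (pvNc f2)).filter (pvOk anz_1 anz_2 f1 f2) := by
        rw [htake, List.flatMap_append, List.filter_append, List.append_assoc]
        simp
      rw [hstate1, hstate2]
      exact ih (j+1) O0 (by omega) (by omega)

-- ---- A with both colours equal: nothing is ever appended ----

theorem pvOuter_triv (anz_1 anz_2 : Int) (f1 : String) (n : Nat) (O0 : List (List String)) :
    pvOuterA anz_1 anz_2 f1 f1 (2 ^ n + 1) 0 ([List.replicate n f1], O0) = O0 := by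
  have hmid : pvMidA anz_1 anz_2 f1 f1 (List.replicate n f1) ([List.replicate n f1], O0)
      = ([List.replicate n f1], O0) := by
    rw [pvMidA]
    have hgen : ∀ (l : List Nat),
        l.foldl (fun st i => pvInnerA anz_1 anz_2 f1 f1 ((List.replicate n f1).set i f1)
          (st.1.length + 1) 0 st) ([List.replicate n f1], O0) = ([List.replicate n f1], O0) := by
      intro l
      induction l with
      | nil => rfl
      | cons i l ihl =>
        rw [List.foldl_cons, List.set_replicate_self,
            pvInnerA_of_mem anz_1 anz_2 f1 f1 _ _ _ _ _ (List.mem_singleton.mpr rfl)]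
        exact ihl
    exact hgen _
  simp only [pvOuterA]
  rw [if_pos (by simp), List.getD_cons_zero, hmid]
  obtain ⟨f', hf'⟩ : ∃ f', 2 ^ n = f' + 1 := ⟨2 ^ n - 1, by have := Nat.one_le_two_pow (n := n); omega⟩
  rw [hf']
  simp only [pvOuterA]
  rw [if_neg (by simp)]

-- ---- assembling both sides ----

theorem pv_filter_flatten {α : Type} (p : α → Bool) :
    ∀ (L : List (List α)), (L.flatten).filter p = (L.map (List.filter p)).flatten := by
  intro L
  induction L with
  | nil => rfl
  | cons l L ih => simp [List.filter_append, ih]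

theorem pv_filter_level (anz_1 anz_2 : Int) {f1 f2 : String} (hne : f1 ≠ f2)
    (n k : Nat) (hk : k + 1 ≤ n) :
    (pvRowsB f1 f2 n (k+1)).filter (pvOk anz_1 anz_2 f1 f2)
      = if ((k : Int) + 1 ≤ anz_2 ∧ (n : Int) - ((k : Int) + 1) ≤ anz_1)
        then pvRowsB f1 f2 n (k+1) else [] := by
  by_cases hcond : ((k : Int) + 1 ≤ anz_2 ∧ (n : Int) - ((k : Int) + 1) ≤ anz_1)
  · rw [if_pos hcond, List.filter_eq_self]
    intro r hr
    obtain ⟨hlen, hc2, hc1, _⟩ := pvRows_mem hne hr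
    simp only [pvOk, PySem.List.count_eq, decide_eq_true_eq]
    constructor
    · rw [hc2]; push_cast; omega
    · rw [hc1]
      have hcast : ((n - (k + 1) : ℕ) : Int) = (n : Int) - ((k : Int) + 1) := by omega
      rw [hcast]; omega
  · rw [if_neg hcond, List.filter_eq_nil_iff]
    intro r hr
    obtain ⟨hlen, hc2, hc1, _⟩ := pvRows_mem hne hr
    simp only [pvOk, PySem.List.count_eq, decide_eq_true_eq]
    intro hcontra
    apply hcond
    rw [hc2, hc1] at hcontra
    have h1 : ((k + 1 : ℕ) : Int) = (k : Int) + 1 := by omega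
    have h2 : ((n - (k + 1) : ℕ) : Int) = (n : Int) - ((k : Int) + 1) := by omega
    rw [h1, h2] at hcontra
    exact hcontra

theorem pv_fold_gen {α β : Type} (p : β → Prop) [DecidablePred p] (g : β → List α) :
    ∀ (l : List β) (om : List α),
      l.foldl (fun om k => if p k then om ++ g k else om) om
        = om ++ (l.map (fun k => if p k then g k else [])).flatten := by
  intro l
  induction l with
  | nil => intro om; simp
  | cons k l ih => intro om; by_cases h : p k <;> simp [h, ih]

theorem pv_b_fold (anz_1 anz_2 : Int) (f1 f2 : String) (m : Nat)
    (om : List (List String)) :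
    (PySem.List.pyRange 1 ((m : Int) + 1) 1).foldl
        (fun om k => if k ≤ anz_2 ∧ (m : Int) - k ≤ anz_1
          then om ++ pvRowsB f1 f2 m k.toNat else om) om
      = om ++ ((List.range m).map
          (fun (k : Nat) => if ((k : Int) + 1 ≤ anz_2 ∧ (m : Int) - ((k : Int) + 1) ≤ anz_1)
            then pvRowsB f1 f2 m (k+1) else [])).flatten := by
  rw [PySem.List.pyRange_one]
  have h0 : ((m : Int) + 1 - 1).toNat = m := by omega
  rw [h0]
  rw [pv_fold_gen (fun k => k ≤ anz_2 ∧ (m : Int) - k ≤ anz_1)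
        (fun k => pvRowsB f1 f2 m k.toNat)]
  rw [List.map_map]
  congr 1
  congr 1
  refine List.map_congr_left ?_
  intro k _
  simp only [Function.comp_def]
  have e1 : (1 : Int) + (k : Int) = (k : Int) + 1 := by ring
  have e2 : ((k : Int) + 1).toNat = k + 1 := by omega
  simp only [e1, e2]

-- ===== VERDICT (by name: the statement is the Claim_ definition above) =====
theorem ergebnisraum_zoZ_spec : Claim_equal_ergebnisraum_zoZ := by
  intro az anz_1 anz_2 f1 f2 _
  show ergebnisraum_zoZ az anz_1 anz_2 f1 f2 = ergebnisraum_zoZ_alt az anz_1 anz_2 f1 f2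
  simp only [ergebnisraum_zoZ, ergebnisraum_zoZ_alt]
  have hmin : min az (anz_1 + anz_2) = if az > anz_1 + anz_2 then anz_1 + anz_2 else az := by
    rw [min_def]; split_ifs <;> omega
  rw [hmin]
  set az' := if az > anz_1 + anz_2 then anz_1 + anz_2 else az with haz
  set n := az'.toNat with hn
  have hmaxN : (max az' 0).toNat = n := by
    rcases le_total 0 az' with h | h
    · rw [max_eq_left h]
    · rw [max_eq_right h, hn]
      omega
  rw [hmaxN, List.length_replicate]
  by_cases h12 : f1 = f2
  · rw [if_pos h12]
    subst h12
    split <;> exact pvOuter_triv anz_1 anz_2 f1 n _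
  · rw [if_neg h12]
    have hnc : (max az' 0 : Int) = (n : Int) := by
      rcases le_total 0 az' with h | h
      · rw [max_eq_left h, hn]
        omega
      · rw [max_eq_right h, hn]
        omega
    rw [hnc]
    have hA := pvOuter_spec anz_1 anz_2 h12 n (2 ^ n + 1) 0
      (if az' > anz_1 then [] else [List.replicate n f1])
      (Nat.zero_le _) (by rw [pvQ_length]; exact Nat.sub_le _ _)
    simp only [List.take_zero, List.flatMap_nil, List.filter_nil, List.append_nil] at hA
    rw [hA]
    rw [pvQ_tail h12 n]
    rw [pv_filter_flatten, List.map_map]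
    rw [pv_b_fold anz_1 anz_2 f1 f2 n]
    have hmap : (List.range n).map (List.filter (pvOk anz_1 anz_2 f1 f2) ∘ fun k => pvRowsB f1 f2 n (k+1))
        = (List.range n).map (fun (k : Nat) => if ((k : Int) + 1 ≤ anz_2 ∧ (n : Int) - ((k : Int) + 1) ≤ anz_1)
            then pvRowsB f1 f2 n (k+1) else []) := by
      refine List.map_congr_left ?_
      intro k hk
      rw [List.mem_range] at hk
      simp only [Function.comp_def]
      exact pv_filter_level anz_1 anz_2 h12 n k (by omega)
    rw [hmap]
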